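-- pv_equiv track=rewrite | github.com/garciaagui/project-algorithms | challenges/challenge_palindromes_recursive.py | is_palindrome_recursive
-- ===== SOURCE A (Python) =====
-- def is_palindrome_recursive(word, low_index, high_index):
--     word = word.lower()
--
--     if not len(word) or word[low_index] != word[high_index]:
--         return False
--
--     if low_index == (len(word) - 1) and high_index == 0:
--         return word[low_index] == word[high_index]
--
--     else:
--         low_index += 1
--         high_index -= 1
--         return is_palindrome_recursive(word, low_index, high_index)
-- ===== SOURCE B (Python) =====
-- def is_palindrome_recursive(word, low_index, high_index):
--     word = word.lower()
--     n = len(word)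
--     while True:
--         if not n or word[low_index] != word[high_index]:
--             return False
--         if low_index == n - 1 and high_index == 0:
--             return True
--         low_index += 1
--         high_index -= 1
-- ===== Notes on version B (the rewrite author's own statement) =====
-- stated objective: simpler
-- what changed: B lowercases the word once and replaces A's tail recursion (which re-runs word.lower() over the whole string on every call) by a two-index while loop with the same guards and index stepping.
import Mathlib
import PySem

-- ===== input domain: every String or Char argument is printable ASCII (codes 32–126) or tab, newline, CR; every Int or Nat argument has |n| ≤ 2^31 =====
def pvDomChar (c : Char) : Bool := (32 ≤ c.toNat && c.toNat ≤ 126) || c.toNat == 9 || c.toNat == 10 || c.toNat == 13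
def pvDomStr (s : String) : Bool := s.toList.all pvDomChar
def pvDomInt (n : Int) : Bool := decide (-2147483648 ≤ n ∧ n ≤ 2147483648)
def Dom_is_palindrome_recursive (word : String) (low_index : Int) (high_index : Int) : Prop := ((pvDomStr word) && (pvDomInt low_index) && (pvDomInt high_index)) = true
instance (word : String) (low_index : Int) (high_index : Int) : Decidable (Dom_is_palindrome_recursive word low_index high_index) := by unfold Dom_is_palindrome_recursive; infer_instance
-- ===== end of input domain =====

-- B replaces A's tail recursion (which re-lowercases the whole word on every call) by a
-- single lowercasing followed by a two-index loop with the same guards and index stepping.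

-- two small facts the ports' termination measures cite
lemma pvLenLower (s : List Char) : (PySem.Chars.lower s).length = s.length := by
  simp [PySem.Chars.lower]

lemma pvInRange_of_some {α : Type} {xs : List α} {i : Int} {c : α}
    (h : PySem.List.pyGet? xs i = some c) : PySem.Raise.InRange xs.length i := by
  by_contra hc
  rw [(PySem.List.pyGet?_eq_none_iff _ _).mpr hc] at h
  exact Option.some_ne_none c h.symm

-- ===== PORT A =====
-- literal port of A: lowercases on every call, indexes word[low] and word[high]
-- (a `none` from pyGet? is Python's IndexError; those inputs are outside Pre_, the port returns false there)
def is_palindrome_recursive (word : String) (low_index : Int) (high_index : Int) : Bool :=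
  let w := PySem.Str.lower word
  if PySem.Str.len w = 0 then false
  else
    match hl : PySem.Str.pyGet? w low_index, PySem.Str.pyGet? w high_index with
    | some cl, some ch =>
      if cl ≠ ch then false
      else if low_index = PySem.Str.len w - 1 ∧ high_index = 0 then cl = ch
      else is_palindrome_recursive w (low_index + 1) (high_index - 1)
    | _, _ => false
termination_by ((PySem.Str.lower word).toList.length - low_index).toNat
decreasing_by
  have hin : PySem.List.pyGet? (PySem.Str.lower word).toList low_index = some cl := by
    have h := hl
    rw [PySem.Str.pyGet?, PySem.Chars.pyGet?_eq_listPyGet?] at h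
    exact h
  obtain ⟨_, hlt⟩ := pvInRange_of_some hin
  have hlen : (PySem.Str.lower (PySem.Str.lower word)).toList.length = (PySem.Str.lower word).toList.length := by
    rw [PySem.Str.toList_lower, PySem.Str.toList_lower, pvLenLower]
  omega

-- ===== PORT B =====
-- B's loop: fixed lowered char list and its length, two moving indices
def pvPalLoop (cs : List Char) (n : Int) (lo : Int) (hi : Int) : Bool :=
  if n = 0 then false
  else
    match hl : PySem.List.pyGet? cs lo, PySem.List.pyGet? cs hi with
    | none, _ => false
    | _, none => false
    | some a, some b =>
      if a ≠ b then false
      else if lo = n - 1 ∧ hi = 0 then true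
      else pvPalLoop cs n (lo + 1) (hi - 1)
termination_by ((cs.length : Int) - lo).toNat
decreasing_by
  obtain ⟨_, hlt⟩ := pvInRange_of_some hl
  omega

def is_palindrome_recursive_alt (word : String) (low_index : Int) (high_index : Int) : Bool :=
  let cs := (PySem.Str.lower word).toList
  pvPalLoop cs (PySem.List.len cs) low_index high_index

-- ===== PRECONDITION & SPEC =====
-- Pre_ excludes exactly the inputs on which Python A raises: an IndexError when an index
-- steps out of range before a mismatch or the (low = n-1, high = 0) stop is reached.
def Pre_is_palindrome_recursive (word : String) (low_index : Int) (high_index : Int) : Prop :=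
  let cs := (PySem.Str.lower word).toList
  let n : Int := cs.length
  n = 0 ∨ (-n ≤ low_index ∧ low_index < n ∧ -n ≤ high_index ∧ high_index < n ∧
    ((0 ≤ low_index ∧ low_index + high_index = n - 1) ∨
     ∃ k ∈ List.range ((min (n - 1 - low_index) (n + high_index)).toNat + 1),
       PySem.List.pyGet? cs (low_index + k) ≠ PySem.List.pyGet? cs (high_index - k)))
instance (word : String) (low_index : Int) (high_index : Int) : Decidable (Pre_is_palindrome_recursive word low_index high_index) := by unfold Pre_is_palindrome_recursive; infer_instance

def pvWitness_is_palindrome_recursive : String × Int × Int := ("Aba", 0, 2)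

def Spec_is_palindrome_recursive (word : String) (low_index : Int) (high_index : Int) (out : Bool) : Prop := out = is_palindrome_recursive_alt word low_index high_index
instance (word : String) (low_index : Int) (high_index : Int) (out : Bool) : Decidable (Spec_is_palindrome_recursive word low_index high_index out) := by unfold Spec_is_palindrome_recursive; infer_instance

-- ===== CLAIM (what is proved, stated in full; the proofs are below) =====
def Claim_equal_is_palindrome_recursive : Prop := ∀ (word : String) (low_index : Int) (high_index : Int), Dom_is_palindrome_recursive word low_index high_index → Pre_is_palindrome_recursive word low_index high_index → Spec_is_palindrome_recursive word low_index high_index (is_palindrome_recursive word low_index high_index)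

-- ===== LEMMAS AND PROOFS =====

lemma pvLowerChar_idem (c : Char) : PySem.Chars.lowerChar (PySem.Chars.lowerChar c) = PySem.Chars.lowerChar c := by
  simp only [PySem.Chars.lowerChar, PySem.Chars.isupper, Bool.and_eq_true, decide_eq_true_eq]
  split_ifs with h1 h2
  · exfalso
    obtain ⟨h1a, h1b⟩ := h1
    obtain ⟨h2a, h2b⟩ := h2
    have hb : c.toNat ≤ 90 := Fin.mk_le_mk.mp h1b
    have ha : (65:Nat) ≤ c.toNat := Fin.mk_le_mk.mp h1a
    have hv : (Char.ofNat (c.toNat + 32)).toNat = c.toNat + 32 := by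
      rw [Char.toNat_ofNat, if_pos (Or.inl (by omega))]
    have h2a' : 65 ≤ (Char.ofNat (c.toNat + 32)).toNat := Fin.mk_le_mk.mp h2a
    have h2b' : (Char.ofNat (c.toNat + 32)).toNat ≤ 90 := Fin.mk_le_mk.mp h2b
    rw [hv] at h2a' h2b'
    omega
  · rfl
  · rfl

lemma pvLower_idem (s : List Char) : PySem.Chars.lower (PySem.Chars.lower s) = PySem.Chars.lower s := by
  simp [PySem.Chars.lower, pvLowerChar_idem]

-- equation lemmas for the two ports (their matches carry a named hypothesis, so we
-- unfold them once here with `split` and use these below)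
lemma pvLoop_some (cs : List Char) (n lo hi : Int) {cl ch : Char} (h0 : ¬ n = 0)
    (h1 : PySem.List.pyGet? cs lo = some cl) (h2 : PySem.List.pyGet? cs hi = some ch) :
    pvPalLoop cs n lo hi = (if cl ≠ ch then false else if lo = n - 1 ∧ hi = 0 then true
      else pvPalLoop cs n (lo + 1) (hi - 1)) := by
  rw [pvPalLoop, if_neg h0]
  split
  · next heq1 => rw [h1] at heq1; simp at heq1
  · next x heqa heqb => rw [h2] at heqa; simp at heqa
  · next a b heq1 heq2 =>
      rw [h1] at heq1; rw [h2] at heq2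
      injection heq1 with e1; injection heq2 with e2
      rw [e1, e2]

lemma pvLoop_none_left (cs : List Char) (n lo hi : Int)
    (h1 : PySem.List.pyGet? cs lo = none) : pvPalLoop cs n lo hi = false := by
  rw [pvPalLoop]
  split
  · rfl
  · split
    · rfl
    · rfl
    · next a b heq1 heq2 => rw [h1] at heq1; simp at heq1

lemma pvLoop_none_right (cs : List Char) (n lo hi : Int)
    (h2 : PySem.List.pyGet? cs hi = none) : pvPalLoop cs n lo hi = false := by
  rw [pvPalLoop]
  split
  · rfl
  · split
    · rfl
    · rfl
    · next a b heq1 heq2 => rw [h2] at heq2; simp at heq2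

lemma pvA_len0 (word : String) (lo hi : Int)
    (h0 : PySem.Str.len (PySem.Str.lower word) = 0) :
    is_palindrome_recursive word lo hi = false := by
  rw [is_palindrome_recursive, if_pos h0]

lemma pvA_some (word : String) (lo hi : Int) {cl ch : Char}
    (h0 : ¬ PySem.Str.len (PySem.Str.lower word) = 0)
    (h1 : PySem.Str.pyGet? (PySem.Str.lower word) lo = some cl)
    (h2 : PySem.Str.pyGet? (PySem.Str.lower word) hi = some ch) :
    is_palindrome_recursive word lo hi =
      (if cl ≠ ch then false
       else if lo = PySem.Str.len (PySem.Str.lower word) - 1 ∧ hi = 0 then decide (cl = ch)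
       else is_palindrome_recursive (PySem.Str.lower word) (lo + 1) (hi - 1)) := by
  rw [is_palindrome_recursive, if_neg h0]
  split
  · next a b heq1 heq2 =>
      rw [h1] at heq1; rw [h2] at heq2
      injection heq1 with e1; injection heq2 with e2
      rw [e1, e2]
  · exfalso
    rename_i hno
    exact hno cl ch (by rw [h1]) (by rw [h2])

lemma pvA_none_left (word : String) (lo hi : Int)
    (h1 : PySem.Str.pyGet? (PySem.Str.lower word) lo = none) :
    is_palindrome_recursive word lo hi = false := by
  rw [is_palindrome_recursive]
  split
  · rfl
  · split
    · next a b heq1 heq2 => rw [h1] at heq1; simp at heq1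
    · rfl

lemma pvA_none_right (word : String) (lo hi : Int)
    (h2 : PySem.Str.pyGet? (PySem.Str.lower word) hi = none) :
    is_palindrome_recursive word lo hi = false := by
  rw [is_palindrome_recursive]
  split
  · rfl
  · split
    · next a b heq1 heq2 => rw [h2] at heq2; simp at heq2
    · rfl

-- bridge: string-level indexing of the lowered word is list-level indexing
lemma pvGetBridge (word : String) (i : Int) :
    PySem.Str.pyGet? (PySem.Str.lower word) i
      = PySem.List.pyGet? (PySem.Str.lower word).toList i := by
  rw [PySem.Str.pyGet?, PySem.Chars.pyGet?_eq_listPyGet?]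

-- A on a word equals B's loop over the lowered word (induction on the room above low_index)
lemma pvA_eq_loop (m : Nat) : ∀ (word : String) (lo hi : Int),
    ((PySem.Str.lower word).toList.length : Int) - lo ≤ m →
    is_palindrome_recursive word lo hi
      = pvPalLoop (PySem.Str.lower word).toList ((PySem.Str.lower word).toList.length : Int) lo hi := by
  induction m with
  | zero =>
    intro word lo hi hm
    have e1 : PySem.List.pyGet? (PySem.Str.lower word).toList lo = none := by
      apply (PySem.List.pyGet?_eq_none_iff _ _).mpr
      rintro ⟨-, hb⟩
      omega
    rw [pvA_none_left word lo hi (by rw [pvGetBridge, e1]), pvLoop_none_left _ _ _ _ e1]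
  | succ m ih =>
    intro word lo hi hm
    have hll : (PySem.Str.lower (PySem.Str.lower word)).toList = (PySem.Str.lower word).toList := by
      rw [PySem.Str.toList_lower, PySem.Str.toList_lower, pvLower_idem]
    by_cases h0 : ((PySem.Str.lower word).toList.length : Int) = 0
    · rw [pvA_len0 word lo hi (by rw [PySem.Str.len_eq]; exact h0), pvPalLoop, if_pos h0]
    · have h0' : ¬ PySem.Str.len (PySem.Str.lower word) = 0 := by
        rw [PySem.Str.len_eq]; exact h0
      cases h1 : PySem.List.pyGet? (PySem.Str.lower word).toList lo with
      | none => rw [pvA_none_left word lo hi (by rw [pvGetBridge, h1]), pvLoop_none_left _ _ _ _ h1]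
      | some cl =>
        cases h2 : PySem.List.pyGet? (PySem.Str.lower word).toList hi with
        | none => rw [pvA_none_right word lo hi (by rw [pvGetBridge, h2]), pvLoop_none_right _ _ _ _ h2]
        | some ch =>
          rw [pvA_some word lo hi h0' (by rw [pvGetBridge, h1]) (by rw [pvGetBridge, h2]),
              pvLoop_some _ _ _ _ h0 h1 h2, PySem.Str.len_eq]
          by_cases hne : cl ≠ ch
          · rw [if_pos hne, if_pos hne]
          · rw [if_neg hne, if_neg hne]
            by_cases hterm : lo = ((PySem.Str.lower word).toList.length : Int) - 1 ∧ hi = 0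
            · rw [if_pos hterm, if_pos hterm]
              push Not at hne
              simp [hne]
            · rw [if_neg hterm, if_neg hterm]
              obtain ⟨-, hlt⟩ := pvInRange_of_some h1
              have hrec := ih (PySem.Str.lower word) (lo + 1) (hi - 1) (by rw [hll]; omega)
              rw [hll] at hrec
              exact hrec

theorem pvMain (word : String) (lo hi : Int) :
    is_palindrome_recursive word lo hi = is_palindrome_recursive_alt word lo hi := by
  rw [is_palindrome_recursive_alt]
  simp only [PySem.List.len_eq]
  exact pvA_eq_loop (((PySem.Str.lower word).toList.length : Int) - lo).toNat word lo hi (by omega)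

-- ===== VERDICT (by name: the statement is the Claim_ definition above) =====
theorem is_palindrome_recursive_spec : Claim_equal_is_palindrome_recursive := by
  intro word lo hi _ _
  unfold Spec_is_palindrome_recursive
  exact pvMain word lo hi
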